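-- pv_equiv track=rewrite | github.com/tonyx555/homerun | backend/workers/crypto_worker.py | _markets_for_updated_tokens
-- ===== SOURCE A (Python) =====
-- def _markets_for_updated_tokens(
--     markets: list,
--     token_index: dict[str, set[int]],
--     updated_tokens: set[str],
-- ) -> list:
--     if not markets or not updated_tokens:
--         return []
--
--     market_positions: set[int] = set()
--     for token_id in updated_tokens:
--         market_positions.update(token_index.get(token_id, set()))
--
--     if not market_positions:
--         return []
--
--     return [markets[i] for i in sorted(market_positions)]
-- ===== SOURCE B (Python) =====
-- def _markets_for_updated_tokens(
--     markets: list,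
--     token_index: dict[str, set[int]],
--     updated_tokens: set[str],
-- ) -> list:
--     def hit(i):
--         return any(i in token_index.get(t, ()) for t in updated_tokens)
--     return [m for i, m in enumerate(markets) if hit(i)]
-- ===== Notes on version B (the rewrite author's own statement) =====
-- stated objective: simpler
-- what changed: B builds no positions set at all: it scans the markets once and keeps market i iff some updated token's index entry contains i, replacing A's union-then-sort-then-index pipeline (and both emptiness guards) with a single enumerate-and-filter pass.
-- outside the precondition, e.g. on _markets_for_updated_tokens([{'name': 'BTC'}], {'t': {-1}}, {'t'}): A returns [{'name': 'BTC'}], B returns []; on _markets_for_updated_tokens([{'name': 'BTC'}], {'t': {5}}, {'t'}): A raises IndexError, B returns []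
import Mathlib
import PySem

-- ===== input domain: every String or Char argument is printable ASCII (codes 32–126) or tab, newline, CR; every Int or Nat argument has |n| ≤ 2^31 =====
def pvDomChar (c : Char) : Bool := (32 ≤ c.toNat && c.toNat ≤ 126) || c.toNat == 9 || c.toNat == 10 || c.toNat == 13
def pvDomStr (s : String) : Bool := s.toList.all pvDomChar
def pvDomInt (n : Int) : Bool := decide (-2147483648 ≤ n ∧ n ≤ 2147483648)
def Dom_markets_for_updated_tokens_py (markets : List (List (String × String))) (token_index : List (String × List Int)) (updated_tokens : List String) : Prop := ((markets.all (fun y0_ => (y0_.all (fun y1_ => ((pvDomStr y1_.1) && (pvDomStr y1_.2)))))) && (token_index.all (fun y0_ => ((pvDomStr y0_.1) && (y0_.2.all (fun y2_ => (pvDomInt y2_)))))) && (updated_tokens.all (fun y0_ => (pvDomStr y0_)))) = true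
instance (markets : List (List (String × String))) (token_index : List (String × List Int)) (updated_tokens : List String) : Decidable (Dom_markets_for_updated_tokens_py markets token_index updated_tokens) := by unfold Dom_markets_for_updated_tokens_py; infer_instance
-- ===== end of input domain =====

-- B builds no positions set at all: a single enumerate-and-filter pass keeps market i iff some
-- updated token's index entry contains i, replacing A's union/sort/index pipeline; objective: simpler.

-- ===== PORT A =====
def markets_for_updated_tokens_py (markets : List (List (String × String))) (token_index : List (String × List Int)) (updated_tokens : List String) : List (List (String × String)) :=
  if markets.isEmpty || updated_tokens.isEmpty then []
  else
    let d : PySem.Dict String (List Int) := PySem.Dict.mk token_index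
    let market_positions : PySem.Set Int :=
      updated_tokens.foldl (fun s token_id => PySem.Set.update s (d.getD token_id [])) PySem.Set.empty
    if market_positions.isEmpty then []
    else
      -- markets[i]: pyGetD is exact under Pre_ (every reached position is a valid index)
      (PySem.List.sorted market_positions (fun i => i)).map (fun i => PySem.List.pyGetD markets i [])

-- ===== PORT B =====
-- Source B's inner helper hit(i): does any updated token's index entry contain i?
def pvHit (token_index : List (String × List Int)) (updated_tokens : List String) (i : Int) : Bool :=
  updated_tokens.any (fun t => ((PySem.Dict.mk token_index).getD t []).contains i)

def markets_for_updated_tokens_py_alt (markets : List (List (String × String))) (token_index : List (String × List Int)) (updated_tokens : List String) : List (List (String × String)) :=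
  ((PySem.List.enumerate markets).filter (fun p => pvHit token_index updated_tokens p.1)).map (fun p => p.2)

-- ===== PRECONDITION & SPEC =====
-- Pre_ restricts token_index to the function's natural domain: every position stored under an
-- updated token is a valid index into markets.  Outside it A raises IndexError (position ≥ len
-- or < -len) or returns a value picked by Python's negative-index wraparound, while B skips
-- such positions.
def Pre_markets_for_updated_tokens_py (markets : List (List (String × String))) (token_index : List (String × List Int)) (updated_tokens : List String) : Prop :=
  ∀ p ∈ token_index, p.1 ∈ updated_tokens → ∀ i ∈ p.2, 0 ≤ i ∧ i < (markets.length : Int)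
instance (markets : List (List (String × String))) (token_index : List (String × List Int)) (updated_tokens : List String) : Decidable (Pre_markets_for_updated_tokens_py markets token_index updated_tokens) := by unfold Pre_markets_for_updated_tokens_py; infer_instance

def pvWitness_markets_for_updated_tokens_py : (List (List (String × String))) × (List (String × List Int)) × List String :=
  ([[("name", "BTC-USD")], [("name", "ETH-USD")]], [("tok1", [1]), ("tok2", [0, 1])], ["tok1"])

def Spec_markets_for_updated_tokens_py (markets : List (List (String × String))) (token_index : List (String × List Int)) (updated_tokens : List String) (out : List (List (String × String))) : Prop := out = markets_for_updated_tokens_py_alt markets token_index updated_tokens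
instance (markets : List (List (String × String))) (token_index : List (String × List Int)) (updated_tokens : List String) (out : List (List (String × String))) : Decidable (Spec_markets_for_updated_tokens_py markets token_index updated_tokens out) := by unfold Spec_markets_for_updated_tokens_py; infer_instance

-- ===== CLAIM (what is proved, stated in full; the proofs are below) =====
def Claim_equal_markets_for_updated_tokens_py : Prop := ∀ (markets : List (List (String × String))) (token_index : List (String × List Int)) (updated_tokens : List String), Dom_markets_for_updated_tokens_py markets token_index updated_tokens → Pre_markets_for_updated_tokens_py markets token_index updated_tokens → Spec_markets_for_updated_tokens_py markets token_index updated_tokens (markets_for_updated_tokens_py markets token_index updated_tokens)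

-- ===== LEMMAS AND PROOFS =====

-- any value found in a first-match dict lookup comes from some entry of the association list
theorem pv_getD_mem {ti : List (String × List Int)} {t : String} {i : Int}
    (h : i ∈ (PySem.Dict.mk ti).getD t []) : ∃ p ∈ ti, p.1 = t ∧ i ∈ p.2 := by
  induction ti with
  | nil => simp [PySem.Dict.getD, PySem.Dict.get?] at h
  | cons hd tl ih =>
    rw [PySem.Dict.getD, PySem.Dict.get?_mk_cons] at h
    by_cases he : hd.1 == t
    · simp [he] at h
      exact ⟨hd, by simp, by simpa using he, h⟩
    · simp [he] at h
      obtain ⟨p, hp, h1, h2⟩ := ih (by simpa [PySem.Dict.getD] using h)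
      exact ⟨p, by simp [hp], h1, h2⟩

-- membership in A's positions-accumulating fold
theorem pv_mem_fold (g : String → List Int) (ts : List String) (s0 : PySem.Set Int) (i : Int) :
    i ∈ ts.foldl (fun s t => PySem.Set.update s (g t)) s0 ↔ i ∈ s0 ∨ ∃ t ∈ ts, i ∈ g t := by
  induction ts generalizing s0 with
  | nil => simp
  | cons hd tl ih =>
    simp only [List.foldl_cons, ih, PySem.Set.mem_update, List.mem_cons]
    constructor
    · rintro (⟨h | h⟩ | ⟨t, ht, hi⟩)
      · exact Or.inl h
      · exact Or.inr ⟨hd, Or.inl rfl, h⟩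
      · exact Or.inr ⟨t, Or.inr ht, hi⟩
    · rintro (h | ⟨t, (rfl | ht), hi⟩)
      · exact Or.inl (Or.inl h)
      · exact Or.inl (Or.inr hi)
      · exact Or.inr ⟨t, ht, hi⟩

theorem pv_nodup_fold (g : String → List Int) (ts : List String) (s0 : PySem.Set Int)
    (h : s0.Nodup) : (ts.foldl (fun s t => PySem.Set.update s (g t)) s0).Nodup := by
  induction ts generalizing s0 with
  | nil => exact h
  | cons hd tl ih => exact ih _ (PySem.Set.nodup_update _ _ h)

-- (verdict below)
theorem markets_for_updated_tokens_py_spec : Claim_equal_markets_for_updated_tokens_py := by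
  intro markets token_index updated_tokens _ hpre
  unfold Spec_markets_for_updated_tokens_py
  unfold markets_for_updated_tokens_py markets_for_updated_tokens_py_alt
  dsimp only
  set g : String → List Int := fun t => (PySem.Dict.mk token_index).getD t [] with hg
  set P : PySem.Set Int :=
    updated_tokens.foldl (fun s t => PySem.Set.update s (g t)) PySem.Set.empty with hP
  have memP : ∀ i : Int, i ∈ P ↔ ∃ t ∈ updated_tokens, i ∈ g t := by
    intro i
    rw [hP, pv_mem_fold]
    simp [PySem.Set.empty]
  have hitP : ∀ i : Int, pvHit token_index updated_tokens i = true ↔ i ∈ P := by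
    intro i
    rw [memP]
    simp [pvHit, hg]
  have boundP : ∀ i ∈ P, 0 ≤ i ∧ i < (markets.length : Int) := by
    intro i hi
    obtain ⟨t, ht, hig⟩ := (memP i).1 hi
    obtain ⟨p, hp, hpt, hip⟩ := pv_getD_mem hig
    exact hpre p hp (hpt ▸ ht) i hip
  -- B's result, rewritten as a filtered index range
  have hB : ((PySem.List.enumerate markets).filter (fun p => pvHit token_index updated_tokens p.1)).map
        (fun p => p.2)
      = ((PySem.List.pyRange 0 (markets.length : Int)).filter
          (fun j => pvHit token_index updated_tokens j)).map (fun j => PySem.List.pyGetD markets j []) := by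
    rw [PySem.List.enumerate_eq_map_pyRange markets [], List.filter_map, List.map_map]
    simp only [PySem.List.len]
    rfl
  rw [hB]
  by_cases hm : markets.isEmpty
  · simp only [hm, Bool.true_or, if_true]
    rw [List.isEmpty_iff] at hm
    simp [hm, PySem.List.pyRange]
  by_cases hu : updated_tokens.isEmpty
  · simp only [hm, hu, Bool.or_true, if_true]
    rw [List.isEmpty_iff] at hu
    simp [hu, pvHit]
  simp only [hm, hu, Bool.or_self]
  by_cases hPe : P.isEmpty
  · rw [List.isEmpty_iff] at hPe
    have : ∀ j : Int, pvHit token_index updated_tokens j = false := by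
      intro j
      rw [← Bool.not_eq_true, hitP, hPe]
      simp
    simp [hPe, this]
  simp only [hPe]
  -- main case: sorted P = the filtered index range
  have hsorted : PySem.List.sorted P (fun i => i)
      = (PySem.List.pyRange 0 (markets.length : Int)).filter
          (fun j => pvHit token_index updated_tokens j) := by
    apply PySem.List.sorted_id_eq_of_perm_of_pairwise
    · -- permutation: both are Nodup with the same members
      have hnrange : (PySem.List.pyRange 0 (markets.length : Int)).Nodup := by
        rw [PySem.List.pyRange_zero_natCast]
        exact (List.nodup_range).map (fun a b => by omega)
      apply (List.perm_ext_iff_of_nodup (List.Nodup.filter _ hnrange)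
        (pv_nodup_fold g updated_tokens PySem.Set.empty (by simp [PySem.Set.empty]))).2
      intro j
      simp only [List.mem_filter, hitP]
      constructor
      · rintro ⟨_, hj⟩; exact hj
      · intro hj
        refine ⟨?_, hj⟩
        have := boundP j hj
        rw [PySem.List.mem_pyRange_one]
        omega
    · -- order: a filtered range is increasing
      apply List.Pairwise.filter
      rw [PySem.List.pyRange_zero_natCast]
      exact (List.pairwise_lt_range.map _ (fun a b h => by exact_mod_cast h)).imp le_of_lt
  rw [hsorted]
  simp
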